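-- pv_equiv track=rewrite | github.com/karia/ai_chatbot | lambda_function.py | format_conversation_for_anthropic
-- ===== SOURCE A (Python) =====
-- def format_conversation_for_anthropic(conversation_history, current_message):
--     messages = []
--     last_role = None
--     for msg in conversation_history:
--         role = "assistant" if msg.get('bot_id') else "user"
--         content = msg['text']
--
--         # ユーザーメッセージからボットメンションを除去
--         if role == "user":
--             content = content.split('>', 1)[-1].strip()
--
--         # 同じロールが連続する場合、内容を結合する
--         if role == last_role and messages:
--             messages[-1]["content"] += "\n" + content
--         else:
--             messages.append({"role": role, "content": content})
--
--         last_role = role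
--
--     # 現在のメッセージを追加（ただし、最後のメッセージがuserでない場合のみ）
--     if not messages or messages[-1]["role"] != "user":
--         messages.append({"role": "user", "content": current_message})
--     else:
--         messages[-1]["content"] += "\n" + current_message
--
--     return messages
-- ===== SOURCE B (Python) =====
-- from itertools import groupby
--
-- def format_conversation_for_anthropic(conversation_history, current_message):
--     # pass 1: normalise each entry to a (role, content) pair
--     pairs = []
--     for msg in conversation_history:
--         if msg.get('bot_id'):
--             pairs.append(("assistant", msg['text']))
--         else:
--             pairs.append(("user", msg['text'].split('>', 1)[-1].strip()))
--     # pass 2: collapse consecutive same-role runs with groupby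
--     messages = [{"role": r, "content": "\n".join(c for _, c in grp)}
--                 for r, grp in groupby(pairs, key=lambda p: p[0])]
--     # tail: attach the current message
--     if messages and messages[-1]["role"] == "user":
--         messages[-1]["content"] += "\n" + current_message
--     else:
--         messages.append({"role": "user", "content": current_message})
--     return messages
-- ===== Notes on version B (the rewrite author's own statement) =====
-- stated objective: alternative
-- what changed: Replaces A's single-pass last_role state machine that mutates the growing message list in place with a two-phase pipeline: first map each entry to a (role, content) pair, then collapse consecutive same-role runs with itertools.groupby joining contents by newline, then attach the current message.
import Mathlib
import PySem

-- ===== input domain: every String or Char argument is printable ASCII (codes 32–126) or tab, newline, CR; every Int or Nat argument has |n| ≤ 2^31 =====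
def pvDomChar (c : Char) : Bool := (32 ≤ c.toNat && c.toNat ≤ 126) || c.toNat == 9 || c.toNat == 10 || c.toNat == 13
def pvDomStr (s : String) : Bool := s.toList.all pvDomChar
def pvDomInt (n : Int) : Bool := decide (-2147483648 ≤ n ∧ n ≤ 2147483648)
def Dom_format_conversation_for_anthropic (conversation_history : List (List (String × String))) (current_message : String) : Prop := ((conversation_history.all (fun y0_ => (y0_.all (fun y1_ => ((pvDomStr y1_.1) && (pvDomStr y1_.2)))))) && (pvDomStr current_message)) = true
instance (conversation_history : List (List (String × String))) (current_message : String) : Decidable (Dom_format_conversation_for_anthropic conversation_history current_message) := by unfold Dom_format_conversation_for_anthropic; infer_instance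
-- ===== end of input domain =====

-- B reorganises A's single-pass last_role state machine into a map / group-consecutive / render
-- pipeline (objective: alternative, same cost). Equivalence of RETURN values on Pre_ (history
-- entries that all carry a 'text' key; A and B both raise KeyError otherwise).

-- ===== PORT A =====
-- truthiness of msg.get('bot_id'): key present with a non-empty string value
def pvTruthy (o : Option String) : Bool :=
  match o with
  | some v => !(v == "")
  | none => false

-- messages[-1]["content"] += "\n" + s  (the key "content" is always present in these dicts)
def pvMergeLast (messages : List (List (String × String))) (s : String) : List (List (String × String)) :=
  messages.dropLast ++
    [((PySem.Dict.mk (messages.getLastD [])).modify "content" "" (fun c => c ++ ("\n" ++ s))).items]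

-- one iteration of A's loop; state = (messages, last_role)
def pvStepA (acc : List (List (String × String)) × Option String) (msg : List (String × String)) :
    List (List (String × String)) × Option String :=
  let role : String := if pvTruthy (PySem.Dict.get? (PySem.Dict.mk msg) "bot_id") then "assistant" else "user"
  -- msg['text']: Pre_ guarantees the key is present (Python raises KeyError otherwise)
  let content : String := (PySem.Dict.get? (PySem.Dict.mk msg) "text").getD ""
  -- content.split('>', 1)[-1].strip(): split with sep '>' never returns none and yields a
  -- nonempty list, so the defaults after splitMax?/pyGet? are never reached
  let content : String :=
    if role = "user" then
      PySem.Str.strip ((PySem.List.pyGet? ((PySem.Str.splitMax? content ">" 1).getD []) (-1)).getD "")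
    else content
  if some role = acc.2 ∧ acc.1 ≠ [] then
    (pvMergeLast acc.1 content, some role)
  else
    (acc.1 ++ [[("role", role), ("content", content)]], some role)

def format_conversation_for_anthropic (conversation_history : List (List (String × String))) (current_message : String) : List (List (String × String)) :=
  let messages := (conversation_history.foldl pvStepA ([], none)).1
  if messages = [] ∨ PySem.Dict.getD (PySem.Dict.mk (messages.getLastD [])) "role" "" ≠ "user" then
    messages ++ [[("role", "user"), ("content", current_message)]]
  else
    pvMergeLast messages current_message

-- ===== PORT B =====
-- msg['text'].split('>', 1)[-1].strip()  (defaults never reached: see the comment in port A)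
def pvUserContent (t : String) : String :=
  PySem.Str.strip ((PySem.List.pyGet? ((PySem.Str.splitMax? t ">" 1).getD []) (-1)).getD "")

-- pass 1 of B: one history entry → its (role, content) pair
def pvPairOf (msg : List (String × String)) : String × String :=
  let t : String := (PySem.Dict.get? (PySem.Dict.mk msg) "text").getD ""   -- 'text' present under Pre_
  match PySem.Dict.get? (PySem.Dict.mk msg) "bot_id" with
  | some b => if b ≠ "" then ("assistant", t) else ("user", pvUserContent t)
  | none => ("user", pvUserContent t)

-- pass 2 of B: itertools.groupby — collapse consecutive same-role runs
def pvGroupBy : List (String × String) → List (String × List String)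
  | [] => []
  | (r, c) :: rest =>
    match pvGroupBy rest with
    | (r', cs) :: gs => if r = r' then (r, c :: cs) :: gs else (r, [c]) :: (r', cs) :: gs
    | [] => [(r, [c])]

-- {"role": r, "content": "\n".join(contents)}
def pvRender (g : String × List String) : List (String × String) :=
  [("role", g.1), ("content", PySem.Str.join "\n" g.2)]

def format_conversation_for_anthropic_alt (conversation_history : List (List (String × String))) (current_message : String) : List (List (String × String)) :=
  let messages := (pvGroupBy (conversation_history.map pvPairOf)).map pvRender
  if messages ≠ [] ∧ PySem.Dict.getD (PySem.Dict.mk (messages.getLastD [])) "role" "" = "user" then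
    pvMergeLast messages current_message
  else
    messages ++ [[("role", "user"), ("content", current_message)]]

-- ===== PRECONDITION & SPEC =====
-- Pre_ excludes histories with an entry lacking the 'text' key: there A raises KeyError (and B does too).
def Pre_format_conversation_for_anthropic (conversation_history : List (List (String × String))) (current_message : String) : Prop :=
  ∀ msg ∈ conversation_history, (PySem.Dict.get? (PySem.Dict.mk msg) "text").isSome = true
instance (conversation_history : List (List (String × String))) (current_message : String) : Decidable (Pre_format_conversation_for_anthropic conversation_history current_message) := by unfold Pre_format_conversation_for_anthropic; infer_instance
def pvWitness_format_conversation_for_anthropic : (List (List (String × String))) × String :=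
  ([[("text", "<@U1> hi")], [("bot_id", "B9"), ("text", "hello")]], "now")

def Spec_format_conversation_for_anthropic (conversation_history : List (List (String × String))) (current_message : String) (out : List (List (String × String))) : Prop := out = format_conversation_for_anthropic_alt conversation_history current_message
instance (conversation_history : List (List (String × String))) (current_message : String) (out : List (List (String × String))) : Decidable (Spec_format_conversation_for_anthropic conversation_history current_message out) := by unfold Spec_format_conversation_for_anthropic; infer_instance

-- ===== CLAIM (what is proved, stated in full; the proofs are below) =====
def Claim_equal_format_conversation_for_anthropic : Prop := ∀ (conversation_history : List (List (String × String))) (current_message : String), Dom_format_conversation_for_anthropic conversation_history current_message → Pre_format_conversation_for_anthropic conversation_history current_message → Spec_format_conversation_for_anthropic conversation_history current_message (format_conversation_for_anthropic conversation_history current_message)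

-- ===== LEMMAS AND PROOFS =====

-- A's loop step, phrased on the (role, content) pair it extracts
def pvStep2 (acc : List (List (String × String)) × Option String) (p : String × String) :
    List (List (String × String)) × Option String :=
  if some p.1 = acc.2 ∧ acc.1 ≠ [] then
    (pvMergeLast acc.1 p.2, some p.1)
  else
    (acc.1 ++ [[("role", p.1), ("content", p.2)]], some p.1)

theorem pvStepA_eq (acc : List (List (String × String)) × Option String) (msg : List (String × String)) :
    pvStepA acc msg = pvStep2 acc (pvPairOf msg) := by
  unfold pvStepA pvPairOf pvStep2 pvTruthy pvUserContent
  cases PySem.Dict.get? (PySem.Dict.mk msg) "bot_id" with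
  | none => simp
  | some b =>
    by_cases hb : b = "" <;> simp [hb]

-- contents joined so far, merged into A's message list
def pvCombine (messages : List (List (String × String))) (last : Option String) :
    List (String × List String) → List (List (String × String))
  | [] => messages
  | (r, cs) :: gs =>
    if some r = last ∧ messages ≠ [] then
      pvMergeLast messages (PySem.Str.join "\n" cs) ++ gs.map pvRender
    else
      messages ++ ((r, cs) :: gs).map pvRender

theorem pvMk_items (d : PySem.Dict String String) : PySem.Dict.mk d.items = d := rfl

theorem pvMergeLast_ne_nil (m : List (List (String × String))) (s : String) : pvMergeLast m s ≠ [] := by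
  unfold pvMergeLast; simp

theorem pvJoin_singleton (c : String) : PySem.Str.join "\n" [c] = c := by
  apply String.toList_inj.mp
  simp [PySem.Str.toList_join, PySem.Chars.join, List.intercalate]

theorem pvJoin_cons (c : String) (cs : List String) (h : cs ≠ []) :
    PySem.Str.join "\n" (c :: cs) = c ++ ("\n" ++ PySem.Str.join "\n" cs) := by
  cases cs with
  | nil => exact absurd rfl h
  | cons c' cs' =>
    apply String.toList_inj.mp
    simp [PySem.Str.toList_join, PySem.Chars.join_cons_cons]

theorem pvMergeLast_mergeLast (messages : List (List (String × String))) (a b : String) :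
    pvMergeLast (pvMergeLast messages a) b = pvMergeLast messages (a ++ ("\n" ++ b)) := by
  rcases List.eq_nil_or_concat messages with h | ⟨xs, d, h⟩ <;> subst h <;>
    simp [pvMergeLast, PySem.Dict.modify, pvMk_items,
      PySem.Dict.insert_insert_self, PySem.Dict.getD_insert_self, String.append_assoc]

theorem pvMergeLast_concat (xs : List (List (String × String))) (r c s : String) :
    pvMergeLast (xs ++ [[("role", r), ("content", c)]]) s
      = xs ++ [[("role", r), ("content", c ++ ("\n" ++ s))]] := by
  unfold pvMergeLast
  rw [List.dropLast_concat, List.getLastD_concat]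
  simp [PySem.Dict.modify, PySem.Dict.insert, PySem.Dict.getD, PySem.Dict.get?,
    PySem.Dict.contains]

theorem pvGroupBy_ne_nil (ps : List (String × String)) (g : String × List String)
    (h : g ∈ pvGroupBy ps) : g.2 ≠ [] := by
  induction ps generalizing g with
  | nil => simp [pvGroupBy] at h
  | cons p ps ih =>
    rcases p with ⟨r, c⟩
    rcases hg : pvGroupBy ps with _ | ⟨⟨r', cs⟩, gs⟩ <;> simp only [pvGroupBy, hg] at h
    · simp at h; subst h; simp
    · by_cases hr : r = r'
      · rw [if_pos hr] at h
        rcases List.mem_cons.mp h with h1 | h1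
        · subst h1; simp
        · exact ih g (by rw [hg]; exact List.mem_cons_of_mem _ h1)
      · rw [if_neg hr] at h
        rcases List.mem_cons.mp h with h1 | h1
        · subst h1; simp
        · exact ih g (by rw [hg]; exact h1)

theorem pvCombine_nil (m : List (List (String × String))) (l : Option String) :
    pvCombine m l [] = m := rfl

theorem pvCombine_cons (m : List (List (String × String))) (l : Option String)
    (r : String) (cs : List String) (gs : List (String × List String)) :
    pvCombine m l ((r, cs) :: gs)
      = if some r = l ∧ m ≠ [] then
          pvMergeLast m (PySem.Str.join "\n" cs) ++ gs.map pvRender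
        else m ++ ((r, cs) :: gs).map pvRender := rfl

theorem pvFold_combine (ps : List (String × String))
    (messages : List (List (String × String))) (last : Option String) :
    (List.foldl pvStep2 (messages, last) ps).1 = pvCombine messages last (pvGroupBy ps) := by
  induction ps generalizing messages last with
  | nil => rfl
  | cons p ps ih =>
    rcases p with ⟨r, c⟩
    rw [List.foldl_cons]
    have h2 : pvStep2 (messages, last) (r, c) = ((pvStep2 (messages, last) (r, c)).1, some r) := by
      unfold pvStep2; split <;> rfl
    rw [h2, ih]
    rcases hg : pvGroupBy ps with _ | ⟨⟨r', cs⟩, gs⟩ <;> simp only [pvGroupBy, hg]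
    · by_cases c0 : some r = last ∧ messages ≠ []
      · have e1 : (pvStep2 (messages, last) (r, c)).1 = pvMergeLast messages c := by
          unfold pvStep2; rw [if_pos c0]
        rw [e1, pvCombine_nil, pvCombine_cons, if_pos c0, pvJoin_singleton]
        simp
      · have e1 : (pvStep2 (messages, last) (r, c)).1
            = messages ++ [[("role", r), ("content", c)]] := by
          unfold pvStep2; rw [if_neg c0]
        rw [e1, pvCombine_nil, pvCombine_cons, if_neg c0]
        simp [pvRender, pvJoin_singleton]
    · have hcs : cs ≠ [] := pvGroupBy_ne_nil ps (r', cs) (by rw [hg]; exact List.mem_cons_self)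
      by_cases hr : r = r'
      · subst hr
        rw [if_pos rfl]
        by_cases c0 : some r = last ∧ messages ≠ []
        · have e1 : (pvStep2 (messages, last) (r, c)).1 = pvMergeLast messages c := by
            unfold pvStep2; rw [if_pos c0]
          rw [e1, pvCombine_cons, pvCombine_cons, if_pos c0,
            if_pos ⟨rfl, pvMergeLast_ne_nil _ _⟩, pvMergeLast_mergeLast, pvJoin_cons c cs hcs]
        · have e1 : (pvStep2 (messages, last) (r, c)).1
              = messages ++ [[("role", r), ("content", c)]] := by
            unfold pvStep2; rw [if_neg c0]
          rw [e1, pvCombine_cons, pvCombine_cons, if_neg c0, if_pos ⟨rfl, by simp⟩,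
            pvMergeLast_concat]
          simp [pvRender, pvJoin_cons c cs hcs]
      · rw [if_neg hr]
        have hne : (some r' = some r) → False := fun h => hr (Option.some.inj h).symm
        by_cases c0 : some r = last ∧ messages ≠ []
        · have e1 : (pvStep2 (messages, last) (r, c)).1 = pvMergeLast messages c := by
            unfold pvStep2; rw [if_pos c0]
          rw [e1, pvCombine_cons, pvCombine_cons, if_pos c0,
            if_neg (fun h => hne h.1), pvJoin_singleton]
        · have e1 : (pvStep2 (messages, last) (r, c)).1
              = messages ++ [[("role", r), ("content", c)]] := by
            unfold pvStep2; rw [if_neg c0]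
          rw [e1, pvCombine_cons, pvCombine_cons, if_neg c0, if_neg (fun h => hne h.1)]
          simp [pvRender, pvJoin_singleton]

theorem pvCombine_nil_none (gs : List (String × List String)) :
    pvCombine [] none gs = gs.map pvRender := by
  cases gs with
  | nil => rfl
  | cons g gs => rcases g with ⟨r, cs⟩; simp [pvCombine]

-- ===== VERDICT (by name: the statement is the Claim_ definition above) =====
theorem format_conversation_for_anthropic_spec : Claim_equal_format_conversation_for_anthropic := by
  intro h cm _ _
  unfold Spec_format_conversation_for_anthropic
  unfold format_conversation_for_anthropic format_conversation_for_anthropic_alt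
  have hsa : pvStepA = fun acc msg => pvStep2 acc (pvPairOf msg) :=
    funext fun acc => funext fun msg => pvStepA_eq acc msg
  have hfold : (h.foldl pvStepA ([], none)).1 = (pvGroupBy (h.map pvPairOf)).map pvRender := by
    rw [hsa, ← List.foldl_map, pvFold_combine, pvCombine_nil_none]
  rw [hfold]
  by_cases hc : ((pvGroupBy (h.map pvPairOf)).map pvRender) = [] ∨
      PySem.Dict.getD (PySem.Dict.mk (((pvGroupBy (h.map pvPairOf)).map pvRender).getLastD [])) "role" "" ≠ "user"
  · rw [if_pos hc, if_neg (by tauto)]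
  · rw [if_neg hc, if_pos (by tauto)]
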